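-- pv_equiv track=rewrite | github.com/cdgtlmda/HavenHealthPassport | src/voice/accent_adaptation/accent_adapter.py | _apply_r_dropping
-- ===== SOURCE A (Python) =====
-- def _apply_r_dropping(word: str) -> str:
--     """Apply r-dropping rules."""
--     # Simple rule: drop 'r' after vowels except before vowels
--     vowels = "aeiou"
--     result = []
--
--     for i, char in enumerate(word):
--         if char == "r":
--             # Check if preceded by vowel and not followed by vowel
--             if (
--                 i > 0
--                 and word[i - 1] in vowels
--                 and (i == len(word) - 1 or word[i + 1] not in vowels)
--             ):
--                 continue  # Skip the 'r'
--         result.append(char)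
--
--     return "".join(result)
-- ===== SOURCE B (Python) =====
-- def _apply_r_dropping(word: str) -> str:
--     """Apply r-dropping rules."""
--     vowels = "aeiou"
--     # Split on 'r'; each boundary between parts was an 'r' in the original word.
--     # Reinsert the 'r' unless the left part ends in a vowel (an empty left part
--     # means the preceding original char was 'r' or the word start, never a vowel)
--     # and the right part does not start with a vowel (an empty right part means
--     # the next original char was 'r' or the word end, never a vowel).
--     parts = word.split("r")
--     out = parts[0]
--     for left, right in zip(parts, parts[1:]):
--         if not (left and left[-1] in vowels and (not right or right[0] not in vowels)):
--             out += "r"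
--         out += right
--     return out
-- ===== Notes on version B (the rewrite author's own statement) =====
-- stated objective: faster
-- what changed: Replaces the per-character index loop (which tests word[i-1]/word[i+1] around every char) by split-on-'r' and rejoin: the loop runs only over the split parts, deciding per boundary from the last char of the left part and the first char of the right part whether to reinsert the 'r'.
import Mathlib
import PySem

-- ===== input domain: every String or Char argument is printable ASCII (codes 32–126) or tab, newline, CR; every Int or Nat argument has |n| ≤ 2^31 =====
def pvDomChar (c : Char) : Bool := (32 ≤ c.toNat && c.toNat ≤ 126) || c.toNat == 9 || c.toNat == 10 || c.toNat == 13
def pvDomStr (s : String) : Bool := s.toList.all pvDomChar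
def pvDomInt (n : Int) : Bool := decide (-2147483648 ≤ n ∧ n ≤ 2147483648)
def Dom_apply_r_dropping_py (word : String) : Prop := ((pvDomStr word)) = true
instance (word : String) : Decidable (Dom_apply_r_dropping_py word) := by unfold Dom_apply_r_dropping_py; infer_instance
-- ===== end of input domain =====

-- B replaces A's per-character index loop by split-on-'r' and rejoin over the
-- split parts, deciding per boundary whether to reinsert the 'r' (objective: faster,
-- constant-factor: a timing run measured B faster at the largest size).


-- vowels = "aeiou"; Python's 'c in vowels' for a single char c is membership in these chars
def pvVowels : List Char := ['a', 'e', 'i', 'o', 'u']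

def pvIsVowel (c : Char) : Bool := pvVowels.contains c

-- ===== PORT A =====
def apply_r_dropping_py (word : String) : String :=
  let cs := word.toList
  String.mk ((PySem.List.enumerate cs 0).foldl (fun acc p =>
    if p.2 == 'r' &&
       (decide (0 < p.1) &&
        ((PySem.List.pyGet? cs (p.1 - 1)).any fun pc => pvVowels.contains pc) &&
        (p.1 == (cs.length : Int) - 1 ||
         !((PySem.List.pyGet? cs (p.1 + 1)).any fun nc => pvVowels.contains nc)))
    then acc           -- continue: skip the 'r'
    else acc ++ [p.2]) [])

-- ===== PORT B =====
-- hand port of word.split("r") for the fixed one-char separator 'r': exact — CPython splits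
-- at every occurrence of the separator, keeping empty pieces between adjacent separators
-- and at the ends; returns (first part, remaining parts)
def pvSplitR : List Char → List Char × List (List Char)
  | [] => ([], [])
  | c :: rest =>
    let p := pvSplitR rest
    if c = 'r' then ([], p.1 :: p.2) else (c :: p.1, p.2)

def apply_r_dropping_py_alt (word : String) : String :=
  let parts := pvSplitR word.toList
  -- out = parts[0]; for left, right in zip(parts, parts[1:]): …
  String.mk ((List.zip (parts.1 :: parts.2) parts.2).foldl (fun acc lr =>
    (if !(!lr.1.isEmpty && pvIsVowel (lr.1.getLastD ' ') &&
          (lr.2.isEmpty || !pvIsVowel (lr.2.headD ' ')))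
     then acc ++ ['r'] else acc) ++ lr.2) parts.1)

-- ===== PRECONDITION & SPEC =====
def Spec_apply_r_dropping_py (word : String) (out : String) : Prop := out = apply_r_dropping_py_alt word
instance (word : String) (out : String) : Decidable (Spec_apply_r_dropping_py word out) := by unfold Spec_apply_r_dropping_py; infer_instance

-- ===== CLAIM (what is proved, stated in full; the proofs are below) =====
def Claim_equal_apply_r_dropping_py : Prop := ∀ (word : String), Dom_apply_r_dropping_py word → Spec_apply_r_dropping_py word (apply_r_dropping_py word)

-- ===== LEMMAS AND PROOFS =====

-- canonical recursion both sides are reduced to: prev-char vowelness + rest of the word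
def pvG : Char → List Char → List Char
  | _, [] => []
  | prev, c :: rest =>
    if c == 'r' && pvIsVowel prev && !pvIsVowel (rest.headD ' ')
    then pvG c rest
    else c :: pvG c rest

-- vowelness of the char preceding the next boundary: b if the part is empty, else its last char
def pvPCv (b : Bool) (h : List Char) : Bool := if h.isEmpty then b else pvIsVowel (h.getLastD ' ')

-- the rejoin loop, recursively: b = vowelness of the char before the pending 'r'
def pvLoop : Bool → List (List Char) → List Char
  | _, [] => []
  | b, r :: ts => (if b && !pvIsVowel (r.headD ' ') then [] else ['r']) ++ r ++ pvLoop (pvPCv false r) ts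

-- ---- A-side: A equals the triple filter, then equals pvG ----

-- zip of padded shifts, rewritten as a map over A's enumeration
lemma trips_eq_map (cs : List Char) :
    List.zip (' ' :: cs) (List.zip cs (cs.drop 1 ++ [' '])) =
      (PySem.List.enumerate cs 0).map (fun t =>
        ((' ' :: cs).getD t.1.toNat ' ', (t.2, (cs.drop 1 ++ [' ']).getD t.1.toNat ' '))) := by
  apply List.ext_getElem
  · simp [List.length_zip, PySem.List.length_enumerate]; omega
  · intro k h1 h2
    simp [List.getElem_zip, PySem.List.getElem_enumerate]
    simp at h2
    constructor
    · rw [List.getElem?_eq_getElem (by simp; omega)]; rfl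
    · rw [List.getElem?_eq_getElem (by simp; omega)]; rfl

-- A's 'preceded by a vowel' test agrees with the padded previous character
lemma prev_eq (cs : List Char) (k : Nat) (hk : k < cs.length) :
    (decide (0 < ((k : Int))) &&
      ((PySem.List.pyGet? cs ((k : Int) - 1)).any fun pc => pvVowels.contains pc))
    = pvVowels.contains ((' ' :: cs).getD k ' ') := by
  cases k with
  | zero => simp [pvVowels]
  | succ j =>
    have h1 : ((j + 1 : Nat) : Int) - 1 = (j : Int) := by push_cast; ring
    rw [h1, PySem.List.pyGet?_natCast, List.getElem?_eq_getElem (by omega)]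
    simp only [List.getD, List.getElem?_cons_succ,
      List.getElem?_eq_getElem (show j < cs.length by omega)]
    simp

-- A's 'at the end or not followed by a vowel' test agrees with the padded next character
lemma next_eq (cs : List Char) (k : Nat) (hk : k < cs.length) :
    (((k : Int)) == (cs.length : Int) - 1 ||
      !((PySem.List.pyGet? cs ((k : Int) + 1)).any fun nc => pvVowels.contains nc))
    = !(pvVowels.contains ((cs.drop 1 ++ [' ']).getD k ' ')) := by
  by_cases hlast : k = cs.length - 1
  · have hbe : ((k : Int)) == (cs.length : Int) - 1 := by simp; omega
    rw [hbe, Bool.true_or]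
    rw [List.getD, List.getElem?_append_right (by simp; omega)]
    have : k - (cs.drop 1).length = 0 := by simp; omega
    rw [this]
    simp [pvVowels]
  · have hk1 : k + 1 < cs.length := by omega
    have hbe : (((k : Int)) == (cs.length : Int) - 1) = false := by simp; omega
    have h1 : ((k : Int)) + 1 = ((k + 1 : Nat) : Int) := by push_cast; ring
    rw [hbe, Bool.false_or, h1, PySem.List.pyGet?_natCast,
        List.getElem?_eq_getElem hk1]
    rw [List.getD, List.getElem?_append_left (by simp; omega)]
    rw [List.getElem?_eq_getElem (by simp; omega)]
    simp only [Option.getD_some, List.getElem_drop]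
    simp [show 1 + k = k + 1 from by omega]

lemma a_eq_filter (word : String) :
    apply_r_dropping_py word =
      String.mk (((List.zip (' ' :: word.toList)
          (List.zip word.toList (word.toList.drop 1 ++ [' ']))).filter (fun t =>
        !(t.2.1 == 'r' && pvVowels.contains t.1 && !(pvVowels.contains t.2.2)))).map (·.2.1)) := by
  unfold apply_r_dropping_py
  simp only []
  set cs := word.toList with hcs
  have hfun : (fun (acc : List Char) (p : Int × Char) =>
      if p.2 == 'r' &&
       (decide (0 < p.1) &&
        ((PySem.List.pyGet? cs (p.1 - 1)).any fun pc => pvVowels.contains pc) &&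
        (p.1 == (cs.length : Int) - 1 ||
         !((PySem.List.pyGet? cs (p.1 + 1)).any fun nc => pvVowels.contains nc)))
      then acc else acc ++ [p.2]) =
      (fun acc p =>
      if !(p.2 == 'r' &&
       (decide (0 < p.1) &&
        ((PySem.List.pyGet? cs (p.1 - 1)).any fun pc => pvVowels.contains pc) &&
        (p.1 == (cs.length : Int) - 1 ||
         !((PySem.List.pyGet? cs (p.1 + 1)).any fun nc => pvVowels.contains nc))))
      then acc ++ [p.2] else acc) := by
    funext acc p
    cases (p.2 == 'r' &&
       (decide (0 < p.1) &&
        ((PySem.List.pyGet? cs (p.1 - 1)).any fun pc => pvVowels.contains pc) &&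
        (p.1 == (cs.length : Int) - 1 ||
         !((PySem.List.pyGet? cs (p.1 + 1)).any fun nc => pvVowels.contains nc)))) <;> simp
  rw [hfun, PySem.List.foldl_append_if, trips_eq_map, List.filter_map, List.map_map]
  simp only [List.nil_append]
  have hmf : ((fun (x : Char × Char × Char) => x.2.1) ∘ fun (t : Int × Char) =>
      ((' ' :: cs).getD t.1.toNat ' ', t.2, (List.drop 1 cs ++ [' ']).getD t.1.toNat ' ')) =
      Prod.snd := rfl
  rw [hmf]
  refine congrArg String.mk (congrArg (List.map Prod.snd) (List.filter_congr ?_))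
  intro t ht
  rcases (PySem.List.mem_enumerate_iff _ _ _).mp ht with ⟨k, hk, rfl⟩
  simp only [Function.comp, zero_add, Int.toNat_natCast]
  rw [prev_eq cs k hk, next_eq cs k hk]
  simp [Bool.and_assoc]

lemma trips_cons (p c : Char) (rest : List Char) :
    List.zip (p :: c :: rest) (List.zip (c :: rest) ((c :: rest).drop 1 ++ [' ']))
      = (p, c, rest.headD ' ') :: List.zip (c :: rest) (List.zip rest (rest.drop 1 ++ [' '])) := by
  cases rest <;> rfl

lemma filter_eq_g : ∀ (cs : List Char) (p : Char),
    ((List.zip (p :: cs) (List.zip cs (cs.drop 1 ++ [' ']))).filter (fun t =>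
        !(t.2.1 == 'r' && pvVowels.contains t.1 && !(pvVowels.contains t.2.2)))).map (·.2.1)
      = pvG p cs := by
  intro cs
  induction cs with
  | nil => intro p; simp [pvG]
  | cons c rest ih =>
    intro p
    rw [trips_cons]
    simp only [List.filter_cons, pvG, pvIsVowel]
    by_cases hb : (c = 'r' ∧ p ∈ pvVowels) ∧ rest.head?.getD ' ' ∉ pvVowels
    · rw [if_neg (by simpa using hb),
          if_pos (show (c == 'r' && pvVowels.contains p && !pvVowels.contains (rest.headD ' ')) = true by
            simpa using hb),
          ih c]
    · rw [if_pos (by simp; tauto), List.map_cons,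
          if_neg (show ¬((c == 'r' && pvVowels.contains p && !pvVowels.contains (rest.headD ' ')) = true) by
            simp; tauto),
          ih c]

-- ---- B-side: the split/rejoin equals pvG ----

lemma pcv_cons (b : Bool) (c : Char) (h : List Char) :
    pvPCv b (c :: h) = pvPCv (pvIsVowel c) h := by
  cases h with
  | nil => simp [pvPCv]
  | cons x xs => simp [pvPCv]

lemma head_split_vowel : ∀ (rest : List Char),
    pvIsVowel ((pvSplitR rest).1.headD ' ') = pvIsVowel (rest.headD ' ') := by
  intro rest
  cases rest with
  | nil => rfl
  | cons d rest' =>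
    by_cases hd : d = 'r'
    · subst hd; simp [pvSplitR]; decide
    · simp [pvSplitR, hd]

lemma g_eq_split : ∀ (cs : List Char) (prev : Char),
    pvG prev cs = (pvSplitR cs).1 ++ pvLoop (pvPCv (pvIsVowel prev) (pvSplitR cs).1) (pvSplitR cs).2 := by
  intro cs
  induction cs with
  | nil => intro prev; simp [pvG, pvSplitR, pvLoop]
  | cons c rest ih =>
    intro prev
    by_cases hc : c = 'r'
    · subst hc
      have hsp : pvSplitR ('r' :: rest) = ([], (pvSplitR rest).1 :: (pvSplitR rest).2) := by
        simp [pvSplitR]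
      have hvr : pvIsVowel 'r' = false := by decide
      have hrec : pvG 'r' rest = (pvSplitR rest).1 ++ pvLoop (pvPCv false (pvSplitR rest).1) (pvSplitR rest).2 := by
        rw [ih 'r', hvr]
      rw [hsp]
      rw [show pvPCv (pvIsVowel prev) ([] : List Char) = pvIsVowel prev from rfl]
      simp only [List.nil_append, pvLoop, pvG, beq_self_eq_true, Bool.true_and]
      rw [head_split_vowel rest]
      by_cases h : (pvIsVowel prev && !pvIsVowel (rest.headD ' ')) = true
      · rw [if_pos h, if_pos h, hrec, List.nil_append]
      · rw [if_neg h, if_neg h, hrec]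
        rfl
    · have hsp : pvSplitR (c :: rest) = (c :: (pvSplitR rest).1, (pvSplitR rest).2) := by
        simp [pvSplitR, hc]
      rw [hsp]
      simp only [pvG]
      have hhd : (c == 'r') = false := by simp [hc]
      rw [hhd, Bool.false_and, Bool.false_and, if_neg (by simp)]
      rw [List.cons_append, pcv_cons, ih c]

lemma foldl_loop : ∀ (t : List (List Char)) (h : List Char) (acc : List Char),
    (List.zip (h :: t) t).foldl (fun acc lr =>
      (if !(!lr.1.isEmpty && pvIsVowel (lr.1.getLastD ' ') &&
            (lr.2.isEmpty || !pvIsVowel (lr.2.headD ' ')))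
       then acc ++ ['r'] else acc) ++ lr.2) acc
    = acc ++ pvLoop (pvPCv false h) t := by
  intro t
  induction t with
  | nil => intro h acc; simp [pvLoop]
  | cons r ts ih =>
    intro h acc
    have hz : List.zip (h :: r :: ts) (r :: ts) = (h, r) :: List.zip (r :: ts) ts := by
      simp [List.zip]
    rw [hz, List.foldl_cons, ih r]
    -- condition equality
    have hcond : (!h.isEmpty && pvIsVowel (h.getLastD ' ') &&
          (r.isEmpty || !pvIsVowel (r.headD ' ')))
        = (pvPCv false h && !pvIsVowel (r.headD ' ')) := by
      have h1 : (!h.isEmpty && pvIsVowel (h.getLastD ' ')) = pvPCv false h := by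
        unfold pvPCv
        cases h with
        | nil => simp
        | cons x xs => simp
      have h2 : (r.isEmpty || !pvIsVowel (r.headD ' ')) = !pvIsVowel (r.headD ' ') := by
        cases r with
        | nil => simp; decide
        | cons y ys => simp
      rw [h1, h2]
    simp only [pvLoop]
    rw [hcond]
    cases hA : pvPCv false h <;> cases hB : pvIsVowel (r.headD ' ') <;> simp

lemma b_eq_g (word : String) :
    apply_r_dropping_py_alt word = String.mk (pvG ' ' word.toList) := by
  unfold apply_r_dropping_py_alt
  simp only []
  rw [foldl_loop]
  rw [g_eq_split word.toList ' ']
  rfl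

-- ===== VERDICT (by name: the statement is the Claim_ definition above) =====
theorem apply_r_dropping_py_spec : Claim_equal_apply_r_dropping_py := by
  intro word _
  unfold Spec_apply_r_dropping_py
  rw [a_eq_filter, filter_eq_g, b_eq_g]
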